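-- pv_equiv track=rewrite | github.com/TMUProfLee/CIS322_SP23 | test/test_splitHand.py | configSettings
-- ===== SOURCE A (Python) =====
-- def configSettings(player_name):
--   deck_num = 1
--   for_money = True
--   early_shuffle = False
--
--   partition = player_name.find(";")
--   config=""
--   if partition > 0:
--     config = player_name[partition:]
--     player_name = player_name[0:partition]
--
--   i=0
--   label = ""
--   while i < len(config):
--     if config[i] == ";":
--       label =""
--     else:
--       label = label + config[i]
--     i += 1
--
--     if label == "free":
--       for_money = False
--     if label == "four":
--       deck_num = 4
--     if label == "shuffle":
--       early_shuffle = True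
--
--   return for_money, deck_num, early_shuffle, player_name
-- ===== SOURCE B (Python) =====
-- def configSettings(player_name):
--     deck_num = 1
--     for_money = True
--     early_shuffle = False
--
--     partition = player_name.find(";")
--     if partition > 0:
--         config = player_name[partition:]
--         player_name = player_name[0:partition]
--         for seg in config.split(";"):
--             if seg.startswith("free"):
--                 for_money = False
--             if seg.startswith("four"):
--                 deck_num = 4
--             if seg.startswith("shuffle"):
--                 early_shuffle = True
--
--     return for_money, deck_num, early_shuffle, player_name
-- ===== Notes on version B (the rewrite author's own statement) =====
-- stated objective: idiomatic
-- what changed: Replaces the char-by-char while loop that rebuilds a growing label, reset at each semicolon, with a for-loop over the semicolon-split segments of the config string using startswith prefix tests on whole segments.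
import Mathlib
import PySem

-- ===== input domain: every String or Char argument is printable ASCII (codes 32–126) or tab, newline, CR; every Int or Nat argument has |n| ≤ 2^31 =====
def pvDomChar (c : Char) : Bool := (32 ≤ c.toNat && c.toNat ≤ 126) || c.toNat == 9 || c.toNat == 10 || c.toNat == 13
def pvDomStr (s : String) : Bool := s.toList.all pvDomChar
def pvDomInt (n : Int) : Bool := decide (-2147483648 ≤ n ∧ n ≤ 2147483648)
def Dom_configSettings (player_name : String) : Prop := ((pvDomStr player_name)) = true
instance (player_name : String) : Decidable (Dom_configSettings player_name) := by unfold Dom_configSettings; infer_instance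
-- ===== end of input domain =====

-- B replaces A's char-by-char label accumulator with a `for seg in config.split(';')` loop
-- using prefix tests on whole segments (more idiomatic, same results).

-- ===== PORT A =====
-- the 'while i < len(config)' loop: state = (label, (for_money, deck_num, early_shuffle))
def pvALoop : List Char → List Char → Bool × Int × Bool → Bool × Int × Bool
  | [], _, st => st
  | c :: rest, label, st =>
    let label := if c = ';' then [] else label ++ [c]
    let fm := if label = "free".toList then false else st.1
    let dn := if label = "four".toList then 4 else st.2.1
    let es := if label = "shuffle".toList then true else st.2.2
    pvALoop rest label (fm, dn, es)

def configSettings (player_name : String) : Bool × Int × Bool × String :=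
  let partition := PySem.Str.find player_name ";"
  let config : String := ""
  let (config, player_name) :=
    if partition > 0 then
      (PySem.Str.slice player_name (some partition) none,
       PySem.Str.slice player_name (some 0) (some partition))
    else (config, player_name)
  let st := pvALoop config.toList [] (true, 1, false)
  (st.1, st.2.1, st.2.2, player_name)

-- ===== PORT B =====
-- body of 'for seg in config.split(";")'
def pvBSeg (st : Bool × Int × Bool) (seg : List Char) : Bool × Int × Bool :=
  let fm := if PySem.Chars.startswith seg "free".toList then false else st.1
  let dn := if PySem.Chars.startswith seg "four".toList then 4 else st.2.1
  let es := if PySem.Chars.startswith seg "shuffle".toList then true else st.2.2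
  (fm, dn, es)

def configSettings_alt (player_name : String) : Bool × Int × Bool × String :=
  let partition := PySem.Str.find player_name ";"
  if partition > 0 then
    let config := PySem.Str.slice player_name (some partition) none
    let pn := PySem.Str.slice player_name (some 0) (some partition)
    -- config.split(";") on a one-char separator = List.splitOn ';'
    let st := (List.splitOn ';' config.toList).foldl pvBSeg (true, 1, false)
    (st.1, st.2.1, st.2.2, pn)
  else (true, 1, false, player_name)

-- ===== PRECONDITION & SPEC =====
def Spec_configSettings (player_name : String) (out : Bool × Int × Bool × String) : Prop := out = configSettings_alt player_name
instance (player_name : String) (out : Bool × Int × Bool × String) : Decidable (Spec_configSettings player_name out) := by unfold Spec_configSettings; infer_instance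

-- ===== CLAIM (what is proved, stated in full; the proofs are below) =====
def Claim_equal_configSettings : Prop := ∀ (player_name : String), Dom_configSettings player_name → Spec_configSettings player_name (configSettings player_name)

-- ===== LEMMAS AND PROOFS =====

-- A's incremental check applied to a segment started with accumulated label `l`:
-- word w fires iff w is a prefix of l ++ seg that strictly extends l.
def pvStepFrom (l : List Char) (st : Bool × Int × Bool) (seg : List Char) : Bool × Int × Bool :=
  let fm := if "free".toList <+: l ++ seg ∧ l.length < 4 then false else st.1
  let dn := if "four".toList <+: l ++ seg ∧ l.length < 4 then 4 else st.2.1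
  let es := if "shuffle".toList <+: l ++ seg ∧ l.length < 7 then true else st.2.2
  (fm, dn, es)

theorem pvStepFrom_nil (l : List Char) (st : Bool × Int × Bool) :
    pvStepFrom l st [] = st := by
  obtain ⟨fm, dn, es⟩ := st
  unfold pvStepFrom
  have hf : ¬("free".toList <+: l ∧ l.length < 4) := by
    rintro ⟨hp, hl⟩; have := hp.length_le; simp at this ⊢; omega
  have ho : ¬("four".toList <+: l ∧ l.length < 4) := by
    rintro ⟨hp, hl⟩; have := hp.length_le; simp at this ⊢; omega
  have hs : ¬("shuffle".toList <+: l ∧ l.length < 7) := by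
    rintro ⟨hp, hl⟩; have := hp.length_le; simp at this ⊢; omega
  simp only [List.append_nil]
  rw [if_neg hf, if_neg ho, if_neg hs]

theorem pvSplitOn_semi_cons (cs : List Char) :
    List.splitOn ';' (';' :: cs) = [] :: List.splitOn ';' cs := by
  simp [List.splitOn, List.splitOnP_cons]

theorem pvSplitOn_other_cons (c : Char) (cs : List Char) (h : c ≠ ';') :
    List.splitOn ';' (c :: cs) = List.modifyHead (List.cons c) (List.splitOn ';' cs) := by
  simp [List.splitOn, List.splitOnP_cons, h]

theorem pvStepFrom_zero (st : Bool × Int × Bool) (seg : List Char) :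
    pvStepFrom [] st seg = pvBSeg st seg := by
  unfold pvStepFrom pvBSeg
  simp [PySem.Chars.startswith, List.isPrefixOf_iff_prefix]

theorem pvSplitOn_ne_nil (cs : List Char) : List.splitOn ';' cs ≠ [] := by
  induction cs with
  | nil => simp
  | cons c cs ih =>
    by_cases hc : c = ';'
    · subst hc; simp [pvSplitOn_semi_cons]
    · rw [pvSplitOn_other_cons c cs hc]
      cases h : List.splitOn ';' cs
      · exact absurd h ih
      · simp

-- the prefix-fire condition splits across consuming one non-';' character
theorem pvFire_split (w l : List Char) (c : Char) (seg : List Char) :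
    (w <+: l ++ c :: seg ∧ l.length < w.length) ↔
      (l ++ [c] = w) ∨ (w <+: (l ++ [c]) ++ seg ∧ (l ++ [c]).length < w.length) := by
  constructor
  · rintro ⟨hp, hl⟩
    rcases Nat.lt_or_ge (l.length + 1) w.length with h | h
    · exact Or.inr ⟨by simpa using hp, by simpa using h⟩
    · left
      have hw : w.length = l.length + 1 := by omega
      have ht := List.prefix_iff_eq_take.mp hp
      rw [ht, hw, List.take_append]
      simp
  · rintro (h | ⟨hp, hl⟩)
    · subst h; simp
    · exact ⟨by simpa using hp, by simp at hl; omega⟩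

-- main invariant: A's loop from label l = B's fold, with the first segment checked from l
theorem pvALoop_eq_fold (cs : List Char) : ∀ (l : List Char) (st : Bool × Int × Bool),
    pvALoop cs l st =
      (match List.splitOn ';' cs with
       | [] => st
       | seg :: rest => rest.foldl pvBSeg (pvStepFrom l st seg)) := by
  induction cs with
  | nil =>
    intro l st
    simp [pvALoop, pvStepFrom_nil]
  | cons c cs ih =>
    intro l st
    by_cases hc : c = ';'
    · subst hc
      rw [pvSplitOn_semi_cons]
      show pvALoop (';' :: cs) l st = _
      unfold pvALoop
      simp only [if_true]
      rw [ih [] _]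
      cases h : List.splitOn ';' cs with
      | nil => exact absurd h (pvSplitOn_ne_nil cs)
      | cons seg rest =>
        simp [pvStepFrom_nil, pvStepFrom_zero]
    · rw [pvSplitOn_other_cons c cs hc]
      show pvALoop (c :: cs) l st = _
      unfold pvALoop
      simp only [if_neg hc]
      rw [ih (l ++ [c]) _]
      cases h : List.splitOn ';' cs with
      | nil => exact absurd h (pvSplitOn_ne_nil cs)
      | cons seg rest =>
        simp only [List.modifyHead_cons]
        congr 1
        -- pvStepFrom (l++[c]) (onestep st) seg = pvStepFrom l st (c :: seg)
        obtain ⟨fm, dn, es⟩ := st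
        unfold pvStepFrom
        have hfree := pvFire_split "free".toList l c seg
        have hfour := pvFire_split "four".toList l c seg
        have hshuf := pvFire_split "shuffle".toList l c seg
        simp only [List.length_append, List.length_singleton] at *
        refine Prod.ext ?_ (Prod.ext ?_ ?_) <;> simp only
        · by_cases hq : l ++ [c] = "free".toList
          · have hR : "free".toList <+: l ++ c :: seg ∧ l.length < 4 := by
              rw [show (4:ℕ) = ("free".toList).length by decide] at *
              exact hfree.mpr (Or.inl hq)
            rw [if_pos hq, ite_self, if_pos hR]
          · rw [if_neg hq]
            by_cases h1 : "free".toList <+: (l ++ [c]) ++ seg ∧ l.length + 1 < 4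
            · have hR : "free".toList <+: l ++ c :: seg ∧ l.length < 4 := by
                rw [show (4:ℕ) = ("free".toList).length by decide] at *
                exact hfree.mpr (Or.inr (by simpa using h1))
              rw [if_pos h1, if_pos hR]
            · have hR : ¬ ("free".toList <+: l ++ c :: seg ∧ l.length < 4) := by
                intro hF
                rw [show (4:ℕ) = ("free".toList).length by decide] at *
                rcases hfree.mp hF with h | h
                · exact hq h
                · exact h1 (by simpa using h)
              rw [if_neg h1, if_neg hR]
        · by_cases hq : l ++ [c] = "four".toList
          · have hR : "four".toList <+: l ++ c :: seg ∧ l.length < 4 := by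
              rw [show (4:ℕ) = ("four".toList).length by decide] at *
              exact hfour.mpr (Or.inl hq)
            rw [if_pos hq, ite_self, if_pos hR]
          · rw [if_neg hq]
            by_cases h1 : "four".toList <+: (l ++ [c]) ++ seg ∧ l.length + 1 < 4
            · have hR : "four".toList <+: l ++ c :: seg ∧ l.length < 4 := by
                rw [show (4:ℕ) = ("four".toList).length by decide] at *
                exact hfour.mpr (Or.inr (by simpa using h1))
              rw [if_pos h1, if_pos hR]
            · have hR : ¬ ("four".toList <+: l ++ c :: seg ∧ l.length < 4) := by
                intro hF
                rw [show (4:ℕ) = ("four".toList).length by decide] at *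
                rcases hfour.mp hF with h | h
                · exact hq h
                · exact h1 (by simpa using h)
              rw [if_neg h1, if_neg hR]
        · by_cases hq : l ++ [c] = "shuffle".toList
          · have hR : "shuffle".toList <+: l ++ c :: seg ∧ l.length < 7 := by
              rw [show (7:ℕ) = ("shuffle".toList).length by decide] at *
              exact hshuf.mpr (Or.inl hq)
            rw [if_pos hq, ite_self, if_pos hR]
          · rw [if_neg hq]
            by_cases h1 : "shuffle".toList <+: (l ++ [c]) ++ seg ∧ l.length + 1 < 7
            · have hR : "shuffle".toList <+: l ++ c :: seg ∧ l.length < 7 := by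
                rw [show (7:ℕ) = ("shuffle".toList).length by decide] at *
                exact hshuf.mpr (Or.inr (by simpa using h1))
              rw [if_pos h1, if_pos hR]
            · have hR : ¬ ("shuffle".toList <+: l ++ c :: seg ∧ l.length < 7) := by
                intro hF
                rw [show (7:ℕ) = ("shuffle".toList).length by decide] at *
                rcases hshuf.mp hF with h | h
                · exact hq h
                · exact h1 (by simpa using h)
              rw [if_neg h1, if_neg hR]

theorem pvALoop_eq_foldB (cs : List Char) (st : Bool × Int × Bool) :
    pvALoop cs [] st = (List.splitOn ';' cs).foldl pvBSeg st := by
  rw [pvALoop_eq_fold cs [] st]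
  cases h : List.splitOn ';' cs with
  | nil => exact absurd h (pvSplitOn_ne_nil cs)
  | cons seg rest => simp [pvStepFrom_zero]

-- ===== VERDICT (by name: the statement is the Claim_ definition above) =====
theorem configSettings_spec : Claim_equal_configSettings := by
  intro player_name _
  unfold Spec_configSettings configSettings configSettings_alt
  by_cases hp : PySem.Str.find player_name ";" > 0
  · simp only [if_pos hp, pvALoop_eq_foldB]
  · simp only [if_neg hp]
    rfl
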